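-- pv_equiv track=rewrite | github.com/levicruz49/AcoesPrecoJusto | SCRIPTS_TESTADOS.py | roic_is_ok
-- ===== SOURCE A (Python) =====
-- def roic_is_ok(roic_data):
--     # Inicialmente, suponha que o ROIC está OK
--     roic_ok = True
--
--     # Verifique se há mais de 2 anos com ROIC < 15%
--     bad_years = [year for year, roic in roic_data.items() if roic is not None and roic < 15]
--
--     if len(bad_years) > 3:
--         roic_ok = False
--
--     # Verifique se há algum ano ruim nos últimos 3 anos
--     recent_years = sorted(roic_data.keys())[-3:]
--     if any(year in bad_years for year in recent_years):
--         roic_ok = False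
--
--     return roic_ok
-- ===== SOURCE B (Python) =====
-- def roic_is_ok(roic_data):
--     # Single O(n) pass, no sorting: count low-ROIC years while maintaining the
--     # three largest years seen so far (with their ROIC) in a tiny bounded buffer.
--     bad = 0
--     top = []  # up to 3 (year, roic) pairs with the largest years, ascending by year
--     for year, roic in roic_data.items():
--         if roic is not None and roic < 15:
--             bad += 1
--         if len(top) < 3 or year > top[0][0]:
--             i = 0
--             while i < len(top) and top[i][0] < year:
--                 i += 1
--             top.insert(i, (year, roic))
--             if len(top) > 3:
--                 top.pop(0)
--     if bad > 3:
--         return False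
--     return all(r is None or r >= 15 for _, r in top)
-- ===== Notes on version B (the rewrite author's own statement) =====
-- stated objective: alternative
-- what changed: B makes a single pass with an accumulator (bad-year count plus a bounded buffer of the three largest years with their ROIC), eliminating A's sort of all keys and its prebuilt bad_years list.
import Mathlib
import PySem

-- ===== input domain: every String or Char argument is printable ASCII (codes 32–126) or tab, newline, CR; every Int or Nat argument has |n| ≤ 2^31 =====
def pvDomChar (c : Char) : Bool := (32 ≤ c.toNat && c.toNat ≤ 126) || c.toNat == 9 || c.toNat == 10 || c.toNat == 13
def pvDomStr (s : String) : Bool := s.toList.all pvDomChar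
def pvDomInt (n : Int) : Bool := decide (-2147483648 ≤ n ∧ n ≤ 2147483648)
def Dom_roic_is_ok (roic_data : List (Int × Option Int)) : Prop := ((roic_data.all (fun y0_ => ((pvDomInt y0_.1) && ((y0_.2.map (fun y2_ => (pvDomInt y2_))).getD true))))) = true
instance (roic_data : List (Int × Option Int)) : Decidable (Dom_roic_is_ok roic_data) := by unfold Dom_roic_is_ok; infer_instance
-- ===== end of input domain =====

-- B replaces A's sort-and-filter staging by a single O(n) pass that counts bad
-- years while maintaining the three largest years in a bounded buffer (simpler
-- data flow, no sorting); same return value on every dict (nodup-key list).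

-- the Python test "roic is not None and roic < 15" (used by both sources)
def pvIsBad (roic : Option Int) : Bool :=
  match roic with | some r => decide (r < 15) | none => false

-- ===== PORT A =====
def roic_is_ok (roic_data : List (Int × Option Int)) : Bool :=
  let roic_ok := true
  let bad_years := (roic_data.filter (fun p => pvIsBad p.2)).map Prod.fst
  let roic_ok := if bad_years.length > 3 then false else roic_ok
  let recent_years := PySem.List.slice
      (PySem.List.sorted (roic_data.map Prod.fst) (fun x => x) false) (some (-3)) none
  let roic_ok := if recent_years.any (fun year => bad_years.contains year) then false else roic_ok
  roic_ok

-- ===== PORT B =====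
-- Source B's while-loop insertion 'i = 0; while …; top.insert(i, (year, roic))' as
-- the obvious structural recursion over top
def pvIns (p : Int × Option Int) : List (Int × Option Int) → List (Int × Option Int)
  | [] => [p]
  | q :: t => if q.1 < p.1 then q :: pvIns p t else p :: q :: t

-- one iteration of Source B's for-loop: bump the bad count, update the top-3 buffer
def pvStep (acc : Nat × List (Int × Option Int)) (p : Int × Option Int) :
    Nat × List (Int × Option Int) :=
  let bad := if pvIsBad p.2 then acc.1 + 1 else acc.1
  let grow : Bool := decide (acc.2.length < 3) ||
    (match acc.2.head? with | some q => decide (q.1 < p.1) | none => false)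
  let top := if grow then
      let t := pvIns p acc.2
      if t.length > 3 then t.drop 1 else t
    else acc.2
  (bad, top)

def roic_is_ok_alt (roic_data : List (Int × Option Int)) : Bool :=
  let r := roic_data.foldl pvStep (0, [])
  if r.1 > 3 then false
  else r.2.all (fun q => match q.2 with | none => true | some v => decide (15 ≤ v))

-- ===== PRECONDITION & SPEC =====
-- Pre_ excludes association lists with duplicate keys: they do not represent a
-- Python dict (the dict argument has unique keys by construction).
def Pre_roic_is_ok (roic_data : List (Int × Option Int)) : Prop :=
  (roic_data.map Prod.fst).Nodup
instance (roic_data : List (Int × Option Int)) : Decidable (Pre_roic_is_ok roic_data) := by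
  unfold Pre_roic_is_ok; infer_instance
def pvWitness_roic_is_ok : (List (Int × Option Int)) := [(2020, some 20), (2021, some 10)]

def Spec_roic_is_ok (roic_data : List (Int × Option Int)) (out : Bool) : Prop := out = roic_is_ok_alt roic_data
instance (roic_data : List (Int × Option Int)) (out : Bool) : Decidable (Spec_roic_is_ok roic_data out) := by unfold Spec_roic_is_ok; infer_instance

-- ===== CLAIM (what is proved, stated in full; the proofs are below) =====
def Claim_equal_roic_is_ok : Prop := ∀ (roic_data : List (Int × Option Int)), Dom_roic_is_ok roic_data → Pre_roic_is_ok roic_data → Spec_roic_is_ok roic_data (roic_is_ok roic_data)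

-- ===== LEMMAS AND PROOFS =====

-- insertion sort by key, grown from the left exactly as B's fold grows its buffer
def pvISort (d : List (Int × Option Int)) : List (Int × Option Int) :=
  d.foldl (fun s q => pvIns q s) []

-- the last three elements (B keeps exactly these of the key-sorted data)
def pvLast3 (L : List (Int × Option Int)) : List (Int × Option Int) :=
  L.drop (L.length - 3)

lemma length_pvIns (p : Int × Option Int) (l : List (Int × Option Int)) :
    (pvIns p l).length = l.length + 1 := by
  induction l with
  | nil => rfl
  | cons q t ih => simp only [pvIns]; split <;> simp [ih]

lemma mem_pvIns {x p : Int × Option Int} {l : List (Int × Option Int)} :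
    x ∈ pvIns p l ↔ x = p ∨ x ∈ l := by
  induction l with
  | nil => simp [pvIns]
  | cons q t ih => simp only [pvIns]; split <;> simp [ih, or_left_comm]

lemma pvIns_perm (p : Int × Option Int) (l : List (Int × Option Int)) :
    (pvIns p l).Perm (p :: l) := by
  induction l with
  | nil => rfl
  | cons q t ih =>
    simp only [pvIns]; split
    · exact (ih.cons q).trans (List.Perm.swap p q t)
    · rfl

lemma pvIns_sorted {p : Int × Option Int} {l : List (Int × Option Int)}
    (h : l.Pairwise (fun a b => a.1 ≤ b.1)) :
    (pvIns p l).Pairwise (fun a b => a.1 ≤ b.1) := by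
  induction l with
  | nil => simp [pvIns]
  | cons q t ih =>
    rw [List.pairwise_cons] at h
    obtain ⟨hq, ht⟩ := h
    simp only [pvIns]; split
    · rename_i hlt
      rw [List.pairwise_cons]
      refine ⟨fun x hx => ?_, ih ht⟩
      rcases mem_pvIns.mp hx with rfl | hx
      · exact le_of_lt hlt
      · exact hq x hx
    · rename_i hge
      rw [List.pairwise_cons]
      refine ⟨fun x hx => ?_, List.pairwise_cons.mpr ⟨hq, ht⟩⟩
      rcases hx with _ | hx
      · exact le_of_not_gt hge
      · exact le_trans (le_of_not_gt hge) (hq x (by assumption))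

lemma pvISort_append_singleton (d : List (Int × Option Int)) (p : Int × Option Int) :
    pvISort (d ++ [p]) = pvIns p (pvISort d) := by
  simp [pvISort, List.foldl_append]

lemma pvISort_perm (d : List (Int × Option Int)) : (pvISort d).Perm d := by
  induction d using List.reverseRecOn with
  | nil => rfl
  | append_singleton d p ih =>
    rw [pvISort_append_singleton]
    exact ((pvIns_perm p (pvISort d)).trans (ih.cons p)).trans
      (List.perm_append_singleton p d).symm

lemma pvISort_sorted (d : List (Int × Option Int)) :
    (pvISort d).Pairwise (fun a b => a.1 ≤ b.1) := by
  induction d using List.reverseRecOn with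
  | nil => simp [pvISort]
  | append_singleton d p ih => rw [pvISort_append_singleton]; exact pvIns_sorted ih

lemma pvIns_append_left {p : Int × Option Int} {l₁ l₂ : List (Int × Option Int)}
    (h : ∀ a ∈ l₁, a.1 < p.1) : pvIns p (l₁ ++ l₂) = l₁ ++ pvIns p l₂ := by
  induction l₁ with
  | nil => rfl
  | cons a t ih =>
    simp only [List.cons_append, pvIns, h a List.mem_cons_self, if_true]
    rw [ih (fun x hx => h x (List.mem_cons_of_mem a hx))]

lemma pvIns_append_stop {p b : Int × Option Int} {l₁ l₂ : List (Int × Option Int)}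
    (h : ¬ b.1 < p.1) : pvIns p (l₁ ++ b :: l₂) = pvIns p l₁ ++ b :: l₂ := by
  induction l₁ with
  | nil => simp [pvIns, h]
  | cons a t ih =>
    simp only [List.cons_append, pvIns]
    split <;> simp [ih]

-- the crux: one pvStep on B's buffer = keeping the last three of one insertion
lemma pvStep_top {S : List (Int × Option Int)} (c : Nat) (p : Int × Option Int)
    (hs : S.Pairwise (fun a b => a.1 ≤ b.1)) (hp : p.1 ∉ S.map Prod.fst) :
    (pvStep (c, pvLast3 S) p).2 = pvLast3 (pvIns p S) := by
  have hlen := length_pvIns p S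
  by_cases h3 : S.length < 3
  · have h0 : S.length - 3 = 0 := by omega
    have h0' : (pvIns p S).length - 3 = 0 := by omega
    have hng : ¬ (pvIns p S).length > 3 := by omega
    simp [pvStep, pvLast3, h0, h0', h3, hng]
  · replace h3 : 3 ≤ S.length := le_of_not_gt h3
    set k := S.length - 3 with hk
    have hdl : (S.drop k).length = 3 := by rw [List.length_drop]; omega
    have htl : (S.take k).length = k := by rw [List.length_take]; omega
    obtain ⟨q, rest, hdk⟩ : ∃ q rest, S.drop k = q :: rest := by
      cases hdk : S.drop k with
      | nil => rw [hdk] at hdl; simp at hdl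
      | cons q rest => exact ⟨q, rest, rfl⟩
    have hq_mem : q ∈ S := List.mem_of_mem_drop (hdk ▸ List.mem_cons_self)
    have hrest : rest.length = 2 := by rw [hdk] at hdl; simpa using hdl
    have hqp : q.1 ≠ p.1 := fun h => hp (h ▸ List.mem_map.mpr ⟨q, hq_mem, rfl⟩)
    have hcross : ∀ a ∈ S.take k, ∀ b ∈ S.drop k, a.1 ≤ b.1 := by
      have hs' := hs
      rw [← List.take_append_drop k S, List.pairwise_append] at hs'
      exact hs'.2.2
    by_cases hlt : q.1 < p.1
    · -- p lands in the top-3 window: both sides drop the smallest of four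
      have hcr : ∀ a ∈ S.take k, a.1 < p.1 := fun a ha =>
        lt_of_le_of_lt (hcross a ha q (hdk ▸ List.mem_cons_self)) hlt
      have hins : pvIns p S = S.take k ++ pvIns p (S.drop k) := by
        conv_lhs => rw [← List.take_append_drop k S]
        exact pvIns_append_left hcr
      have hrl : (pvIns p (S.drop k)).length = 4 := by rw [length_pvIns, hdl]
      have hL : (pvIns p S).length - 3 = k + 1 := by omega
      simp only [pvLast3]
      have hdrop : (S.take k ++ pvIns p (S.drop k)).drop (k + 1)
          = (pvIns p (S.drop k)).drop 1 := by
        have h := List.drop_length_add_append (l₁ := S.take k) (l₂ := pvIns p (S.drop k)) 1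
        rwa [htl] at h
      rw [hL, hins, hdrop]
      simp [pvStep, ← hk, hdk, hlt, pvIns, length_pvIns, hrest]
    · -- p is below the window: the buffer is untouched on both sides
      have hins : pvIns p S = pvIns p (S.take k) ++ q :: rest := by
        conv_lhs => rw [← List.take_append_drop k S, hdk]
        exact pvIns_append_stop hlt
      have hL : (pvIns p S).length - 3 = (pvIns p (S.take k)).length := by
        rw [length_pvIns, length_pvIns, htl]; omega
      simp only [pvLast3]
      rw [hL, hins, List.drop_left]
      simp [pvStep, ← hk, hdk, hlt, hrest]

-- B's fold computes the bad count and the last three of the key-sorted data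
lemma fold_spec (d : List (Int × Option Int)) (h : (d.map Prod.fst).Nodup) :
    d.foldl pvStep (0, []) = ((d.map Prod.snd).countP pvIsBad, pvLast3 (pvISort d)) := by
  induction d using List.reverseRecOn with
  | nil => rfl
  | append_singleton d p ih =>
    rw [List.map_append] at h
    have h' := (List.perm_append_singleton p.1 (d.map Prod.fst)).nodup_iff.mp (by simpa using h)
    obtain ⟨hp, h1⟩ := List.nodup_cons.mp h' 
    have hp' : p.1 ∉ (pvISort d).map Prod.fst := by
      intro hmem
      exact hp (((pvISort_perm d).map Prod.fst).mem_iff.mp hmem)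
    rw [List.foldl_append, ih h1, List.foldl_cons, List.foldl_nil]
    have htop := pvStep_top ((d.map Prod.snd).countP pvIsBad) p (pvISort_sorted d) hp'
    have hfst : (pvStep ((d.map Prod.snd).countP pvIsBad, pvLast3 (pvISort d)) p).1
        = ((d ++ [p]).map Prod.snd).countP pvIsBad := by
      simp [pvStep, List.countP_append, List.countP_cons]
      split <;> simp_all
    rw [Prod.ext_iff]
    exact ⟨hfst, by rw [htop, pvISort_append_singleton]⟩

-- keys are injective on a nodup-key list
lemma key_inj {d : List (Int × Option Int)} (h : (d.map Prod.fst).Nodup)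
    {x y : Int × Option Int} (hx : x ∈ d) (hy : y ∈ d) (hf : x.1 = y.1) : x = y := by
  induction d with
  | nil => cases hx
  | cons a t ih =>
    rw [List.map_cons, List.nodup_cons] at h
    obtain ⟨ha, ht⟩ := h
    rcases List.mem_cons.mp hx with rfl | hx' <;> rcases List.mem_cons.mp hy with rfl | hy'
    · rfl
    · exact absurd (List.mem_map.mpr ⟨y, hy', hf.symm⟩) ha
    · exact absurd (List.mem_map.mpr ⟨x, hx', hf⟩) ha
    · exact ih ht hx' hy' 

-- under unique keys, "q.1 ∈ bad_years" is exactly "q's own roic is bad"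
lemma mem_bad_iff {d : List (Int × Option Int)} (h : (d.map Prod.fst).Nodup)
    {q : Int × Option Int} (hq : q ∈ d) :
    ((d.filter (fun p => pvIsBad p.2)).map Prod.fst).contains q.1 = pvIsBad q.2 := by
  by_cases hb : pvIsBad q.2 = true
  · simp only [List.contains_eq_mem, hb, decide_eq_true_eq]
    have hqf : q ∈ d.filter (fun p => pvIsBad p.2) := by
      rw [List.mem_filter]; exact ⟨hq, hb⟩
    have hmem : q.1 ∈ (d.filter (fun p => pvIsBad p.2)).map Prod.fst :=
      List.mem_map.mpr ⟨q, hqf, rfl⟩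
    exact hmem
  · simp only [Bool.eq_false_iff.mpr hb, List.contains_eq_mem]
    rw [decide_eq_false_iff_not]
    intro hmem
    obtain ⟨q', hq', hq2⟩ := List.mem_map.mp hmem
    have := key_inj h (List.mem_of_mem_filter hq') hq hq2
    subst this
    exact hb (by simpa using (List.mem_filter.mp hq').2)

-- ===== VERDICT (by name: the statement is the Claim_ definition above) =====
theorem roic_is_ok_spec : Claim_equal_roic_is_ok := by
  intro d _ hpre
  unfold Spec_roic_is_ok roic_is_ok roic_is_ok_alt
  rw [fold_spec d hpre]
  -- A's count = B's count
  have hcount : ((d.filter (fun p => pvIsBad p.2)).map Prod.fst).length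
      = (d.map Prod.snd).countP pvIsBad := by
    rw [List.length_map, List.countP_map, ← List.countP_eq_length_filter]
    rfl
  -- A's recent_years = keys of B's final buffer
  have hsort : PySem.List.sorted (d.map Prod.fst) (fun x => x) false
      = (pvISort d).map Prod.fst := by
    exact PySem.List.sorted_id_eq_of_perm_of_pairwise _ _
      ((pvISort_perm d).map Prod.fst)
      (List.pairwise_map.mpr (pvISort_sorted d))
  have hrec : PySem.List.slice (PySem.List.sorted (d.map Prod.fst) (fun x => x) false)
      (some (-3)) none = (pvLast3 (pvISort d)).map Prod.fst := by
    rw [hsort, PySem.List.slice_from_neg_ofNat _ 3 (by norm_num), pvLast3,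
      List.map_drop, List.length_map]
  -- A's any-membership test = B's any-bad test on the buffer
  have hany : ((pvLast3 (pvISort d)).map Prod.fst).any
        (fun year => ((d.filter (fun p => pvIsBad p.2)).map Prod.fst).contains year)
      = (pvLast3 (pvISort d)).any (fun q => pvIsBad q.2) := by
    rw [List.any_map]
    refine PySem.List.any_congr_mem (fun q hq => ?_)
    have hqd : q ∈ d := (pvISort_perm d).subset (List.mem_of_mem_drop hq)
    exact mem_bad_iff hpre hqd
  -- B's all = not-any
  have hall : (pvLast3 (pvISort d)).all
        (fun q => match q.2 with | none => true | some v => decide (15 ≤ v))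
      = !(pvLast3 (pvISort d)).any (fun q => pvIsBad q.2) := by
    rw [List.all_eq_not_any_not]
    congr 1
    refine PySem.List.any_congr_mem (fun q _ => ?_)
    cases hq2 : q.2 with
    | none => simp [pvIsBad]
    | some v =>
      simp only [pvIsBad, ← decide_not]
      simp
  -- assemble the booleans
  simp only [hrec, hany, hcount, hall]
  by_cases h3 : (d.map Prod.snd).countP pvIsBad > 3 <;>
    by_cases hA : (pvLast3 (pvISort d)).any (fun q => pvIsBad q.2) = true <;>
      simp [hA]
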